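-- pv_equiv track=rewrite | github.com/dainshon/CODING | 프로그래머스/unrated/181188. 요격 시스템/요격 시스템.py | solution
-- ===== SOURCE A (Python) =====
-- def solution(targets):
--     answer = 0
--     i = 1
--     j = -1
--     dic_list = []
--
--     for target in targets:
--         # 시작
--         lst = []
--         lst.append(target[0])
--         lst.append(i)
--         # 끝
--         lst_2 = []
--         lst_2.append(target[1])
--         lst_2.append(j)
--
--         i+=1
--         j-=1
--         dic_list.append(lst)
--         dic_list.append(lst_2)
--
--     dic_list.sort(key=lambda x:(x[0],x[1]))
--
--     dic = {}
--     n = 0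
--     for lst in dic_list:
--         dic[lst[1]] = n
--         n+=1
--     stack = []
--     for lst in dic_list:
--         if(lst[1]>0):
--             stack.append(lst[1])
--         elif(lst[1]<0):
--             while(len(stack)>0):
--                 num = -stack.pop()
--                 dic_list[dic[num]][1] = 0    #   리스트에서 몇번째에 있는지
--             answer+=1
--
--
--     return answer
-- ===== SOURCE B (Python) =====
-- def solution(targets):
--     # One-pass greedy over intervals in increasing order of end; scanning the input in
--     # reverse makes equal-end groups arrive in the same order as A's tied end events.
--     answer = 0
--     cur = None
--     for t in sorted(reversed(targets), key=lambda t: t[1]):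
--         s, e = t[0], t[1]
--         if cur is None or s >= cur:
--             answer += 1
--             cur = e
--     return answer
-- ===== Notes on version B (the rewrite author's own statement) =====
-- stated objective: simpler
-- what changed: Replaces A's 2n-event construction + lexicographic sort + dict-indexed stack sweep with in-place zeroing by the classic interval-piercing greedy: one pass over the intervals stably sorted by end (scanning the input in reverse, which reproduces A's order on tied end events), keeping only the last shot coordinate.
import Mathlib
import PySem

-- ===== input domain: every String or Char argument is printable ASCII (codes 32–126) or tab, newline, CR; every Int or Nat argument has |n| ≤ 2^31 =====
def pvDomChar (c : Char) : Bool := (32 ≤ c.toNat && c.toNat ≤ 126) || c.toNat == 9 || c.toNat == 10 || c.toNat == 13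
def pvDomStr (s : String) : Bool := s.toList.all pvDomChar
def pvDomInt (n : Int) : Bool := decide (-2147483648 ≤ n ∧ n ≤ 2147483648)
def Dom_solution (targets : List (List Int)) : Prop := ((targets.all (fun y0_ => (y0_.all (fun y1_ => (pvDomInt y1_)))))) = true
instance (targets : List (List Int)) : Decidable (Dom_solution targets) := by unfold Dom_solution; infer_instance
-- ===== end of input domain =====

-- B is the classic sort-by-end greedy (one pass, one scalar of state) instead of A's
-- event sort + dict-indexed stack sweep with in-place zeroing; equal on Pre_.

-- ===== PORT A =====
-- A-side helper: the 'while(len(stack)>0): num = -stack.pop(); dic_list[dic[num]][1] = 0'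
-- loop — pops every element of the stack (in pop order, i.e. the reverse of the list)
-- and zeroes the id slot of the event at index dic[num] of the current dic_list.
def popZero (dic : PySem.Dict Int Int) (dl : List (Int × Int)) (stack : List Int) :
    List (Int × Int) :=
  stack.reverse.foldl
    (fun dl p =>
      let idx := PySem.Dict.getD dic (-p) 0
      PySem.List.pySetD dl idx ((PySem.List.pyGetD dl idx ((0 : Int), (0 : Int))).1, (0 : Int)))
    dl

-- Python builds each event as a two-element list [coordinate, id]; it is represented
-- as the pair (coordinate, id) (so lst[0] = .1, lst[1] = .2, and 'dic_list[k][1] = 0'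
-- sets the second component).
def solution (targets : List (List Int)) : Int :=
  let built := targets.foldl
    (fun (acc : List (Int × Int) × Int × Int) target =>
      (acc.1 ++ [(PySem.List.pyGetD target 0 0, acc.2.1), (PySem.List.pyGetD target 1 0, acc.2.2)],
       acc.2.1 + 1, acc.2.2 - 1))
    ([], 1, -1)
  let dic_list := PySem.List.sorted2 built.1 (fun x => x.1) (fun x => x.2)
  let dic := (dic_list.foldl
    (fun (p : PySem.Dict Int Int × Int) lst => (p.1.insert lst.2 p.2, p.2 + 1))
    (PySem.Dict.empty, 0)).1
  let res := (PySem.List.pyRange 0 (PySem.List.len dic_list) 1).foldl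
    (fun (st : List (Int × Int) × List Int × Int) idx =>
      let lst := PySem.List.pyGetD st.1 idx ((0 : Int), (0 : Int))
      if lst.2 > 0 then (st.1, st.2.1 ++ [lst.2], st.2.2)
      else if lst.2 < 0 then (popZero dic st.1 st.2.1, ([] : List Int), st.2.2 + 1)
      else st)
    (dic_list, ([] : List Int), (0 : Int))
  res.2.2

-- ===== PORT B =====
def solution_alt (targets : List (List Int)) : Int :=
  ((PySem.List.sorted targets.reverse (fun t => PySem.List.pyGetD t 1 0) false).foldl
    (fun (st : Option Int × Int) t =>
      match st.1 with
      | none => (some (PySem.List.pyGetD t 1 0), st.2 + 1)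
      | some cv =>
          if PySem.List.pyGetD t 0 0 ≥ cv then (some (PySem.List.pyGetD t 1 0), st.2 + 1) else st)
    (none, 0)).2

-- ===== PRECONDITION & SPEC =====
-- Pre_ excludes exactly the inputs on which A raises: a sublist shorter than 2 makes
-- target[1] raise IndexError (B's sort key raises there too).
def Pre_solution (targets : List (List Int)) : Prop :=
  ∀ t ∈ targets, 2 ≤ t.length
instance (targets : List (List Int)) : Decidable (Pre_solution targets) := by
  unfold Pre_solution; infer_instance

def pvWitness_solution : List (List Int) := [[1, 4], [3, 7], [5, 8]]

def Spec_solution (targets : List (List Int)) (out : Int) : Prop := out = solution_alt targets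
instance (targets : List (List Int)) (out : Int) : Decidable (Spec_solution targets out) := by
  unfold Spec_solution; infer_instance

-- ===== CLAIM (what is proved, stated in full; the proofs are below) =====
def Claim_equal_solution : Prop :=
  ∀ (targets : List (List Int)), Dom_solution targets → Pre_solution targets →
    Spec_solution targets (solution targets)

-- ===== LEMMAS AND PROOFS =====

def evMask (Z : List Int) (x : Int × Int) : Int × Int :=
  if Z.contains x.2 then (x.1, 0) else x

def sweep2 : List (Int × Int) → List Int → List Int → Int → Int
  | [], _, _, ans => ans
  | x :: rest, Z, stack, ans =>
    let id' := if Z.contains x.2 then 0 else x.2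
    if 0 < id' then sweep2 rest Z (stack ++ [x.2]) ans
    else if id' < 0 then sweep2 rest (Z ++ stack.reverse.map (fun p => -p)) [] (ans + 1)
    else sweep2 rest Z stack ans

def gstep (st : Option Int × Int) (p : Int × Int) : Option Int × Int :=
  match st.1 with
  | none => (some p.2, st.2 + 1)
  | some cv => if p.1 ≥ cv then (some p.2, st.2 + 1) else st

def greedy (c : Option Int) (ans : Int) (l : List (Int × Int)) : Int :=
  (l.foldl gstep (c, ans)).2

def sK (ts : List (List Int)) (k : Nat) : Int := PySem.List.pyGetD (ts.getD k []) 0 0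
def eK (ts : List (List Int)) (k : Nat) : Int := PySem.List.pyGetD (ts.getD k []) 1 0

def evs : List (List Int) → Int → List (Int × Int)
  | [], _ => []
  | t :: r, b =>
      (PySem.List.pyGetD t 0 0, b + 1) :: (PySem.List.pyGetD t 1 0, -(b + 1)) :: evs r (b + 1)

def evLt (a b : Int × Int) : Prop := a.1 < b.1 ∨ (a.1 = b.1 ∧ a.2 < b.2)

def endsP (ts : List (List Int)) (l : List (Int × Int)) : List (Int × Int) :=
  (l.filter (fun x => decide (x.2 < 0))).map (fun x => (sK ts ((-x.2).toNat - 1), x.1))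

-- 1. construction fold
theorem build_eq (ts : List (List Int)) : ∀ (dl : List (Int × Int)) (b : Int),
    ts.foldl
      (fun (acc : List (Int × Int) × Int × Int) target =>
        (acc.1 ++ [(PySem.List.pyGetD target 0 0, acc.2.1), (PySem.List.pyGetD target 1 0, acc.2.2)],
         acc.2.1 + 1, acc.2.2 - 1))
      (dl, b + 1, -(b + 1))
    = (dl ++ evs ts b, b + ts.length + 1, -(b + ts.length + 1)) := by
  induction ts with
  | nil => intro dl b; simp [evs]
  | cons t r ih =>
    intro dl b
    simp only [List.foldl_cons]
    have h := ih (dl ++ [(PySem.List.pyGetD t 0 0, b + 1), (PySem.List.pyGetD t 1 0, -(b + 1))]) (b + 1)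
    have h2 : -(b + 1) - 1 = -(b + 1 + 1) := by ring
    rw [h2, h]
    simp only [evs, Prod.mk.injEq, List.append_assoc, List.cons_append, List.nil_append,
      List.length_cons]
    refine ⟨by simp, by push_cast; ring, by push_cast; ring⟩

-- 2. membership
theorem mem_evs_iff (x : Int × Int) : ∀ (ts : List (List Int)) (b : Int),
    x ∈ evs ts b ↔ ∃ k : Nat, k < ts.length ∧
      (x = (sK ts k, b + (k : Int) + 1) ∨ x = (eK ts k, -(b + (k : Int) + 1))) := by
  obtain ⟨x1, x2⟩ := x
  intro ts
  induction ts with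
  | nil => intro b; simp [evs]
  | cons t r ih =>
    intro b
    simp only [evs, List.mem_cons, ih (b + 1), Prod.mk.injEq, List.length_cons]
    constructor
    · rintro (⟨h1, h2⟩ | ⟨h1, h2⟩ | ⟨k, hk, h⟩)
      · exact ⟨0, by omega, Or.inl ⟨by simpa [sK] using h1, by omega⟩⟩
      · exact ⟨0, by omega, Or.inr ⟨by simpa [eK] using h1, by omega⟩⟩
      · refine ⟨k + 1, by omega, ?_⟩
        have hs : sK r k = sK (t :: r) (k + 1) := rfl
        have he : eK r k = eK (t :: r) (k + 1) := rfl
        rcases h with ⟨h1, h2⟩ | ⟨h1, h2⟩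
        · exact Or.inl ⟨by rw [h1, hs], by push_cast; omega⟩
        · exact Or.inr ⟨by rw [h1, he], by push_cast; omega⟩
    · rintro ⟨k, hk, h⟩
      cases k with
      | zero =>
        rcases h with ⟨h1, h2⟩ | ⟨h1, h2⟩
        · exact Or.inl ⟨by simpa [sK] using h1, by omega⟩
        · exact Or.inr (Or.inl ⟨by simpa [eK] using h1, by omega⟩)
      | succ k =>
        refine Or.inr (Or.inr ⟨k, by omega, ?_⟩)
        have hs : sK (t :: r) (k + 1) = sK r k := rfl
        have he : eK (t :: r) (k + 1) = eK r k := rfl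
        rcases h with ⟨h1, h2⟩ | ⟨h1, h2⟩
        · exact Or.inl ⟨by rw [h1, hs], by push_cast at h2 ⊢; omega⟩
        · exact Or.inr ⟨by rw [h1, he], by push_cast at h2 ⊢; omega⟩

theorem evs_abs {x : Int × Int} {ts : List (List Int)} {b : Int} (hx : x ∈ evs ts b)
    (hb : 0 ≤ b) : b + 1 ≤ x.2 ∨ x.2 ≤ -(b + 1) := by
  rcases (mem_evs_iff x ts b).1 hx with ⟨k, hk, h | h⟩ <;> subst h <;> simp <;> omega

theorem evs_snd_nodup (ts : List (List Int)) : ∀ (b : Int), 0 ≤ b →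
    ((evs ts b).map Prod.snd).Nodup := by
  induction ts with
  | nil => intro b _; simp [evs]
  | cons t r ih =>
    intro b hb
    simp only [evs, List.map_cons, List.nodup_cons]
    refine ⟨?_, ?_, ih (b + 1) (by omega)⟩
    · simp only [List.mem_cons, List.mem_map]
      rintro (h | ⟨y, hy, h⟩)
      · omega
      · have := evs_abs hy (by omega); omega
    · simp only [List.mem_map]
      rintro ⟨y, hy, h⟩
      have := evs_abs hy (by omega); omega

def ltb (a b : Int × Int) : Bool :=
  decide (a.1 < b.1) || (!decide (b.1 < a.1) && decide (a.2 < b.2))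

theorem ltb_trans {a b c : Int × Int} (h1 : ltb a b = true) (h2 : ltb b c = true) :
    ltb a c = true := by
  simp only [ltb, Bool.or_eq_true, Bool.and_eq_true, Bool.not_eq_true', decide_eq_true_eq,
    decide_eq_false_iff_not] at h1 h2 ⊢
  rcases h1 with h1 | ⟨h1a, h1b⟩ <;> rcases h2 with h2 | ⟨h2a, h2b⟩
  · left; omega
  · left; omega
  · left; omega
  · right; exact ⟨by omega, by omega⟩

theorem ltb_asymm {a b : Int × Int} (h : ltb a b = true) : ltb b a = false := by
  simp only [ltb, Bool.or_eq_true, Bool.and_eq_true, Bool.not_eq_true', decide_eq_true_eq,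
    decide_eq_false_iff_not, Bool.or_eq_false_iff, Bool.and_eq_false_iff,
    Bool.not_eq_false'] at h ⊢
  omega

theorem insertBy_pairwise (x : Int × Int) (l : List (Int × Int))
    (hl : l.Pairwise (fun a b => ltb b a = false)) :
    (PySem.List.insertBy ltb x l).Pairwise (fun a b => ltb b a = false) := by
  induction l with
  | nil => simp [PySem.List.insertBy]
  | cons y ys ih =>
    rcases List.pairwise_cons.1 hl with ⟨hy, hys⟩
    by_cases hxy : ltb x y = true
    · rw [show PySem.List.insertBy ltb x (y :: ys) = x :: y :: ys by
        simp [PySem.List.insertBy, hxy]]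
      refine List.pairwise_cons.2 ⟨?_, hl⟩
      intro z hz
      rcases List.mem_cons.1 hz with rfl | hz
      · exact ltb_asymm hxy
      · by_contra hc
        have hzx : ltb z x = true := by
          cases h : ltb z x
          · exact absurd h hc
          · rfl
        have := ltb_trans hzx hxy
        rw [hy z hz] at this; exact Bool.false_ne_true this
    · rw [show PySem.List.insertBy ltb x (y :: ys) = y :: PySem.List.insertBy ltb x ys by
        simp [PySem.List.insertBy, hxy]]
      refine List.pairwise_cons.2 ⟨?_, ih hys⟩
      intro z hz
      rcases (PySem.List.mem_insertBy ltb x z ys).1 hz with rfl | hz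
      · simpa using hxy
      · exact hy z hz

theorem foldl_insertBy_pairwise (l : List (Int × Int)) : ∀ (acc : List (Int × Int)),
    acc.Pairwise (fun a b => ltb b a = false) →
    (l.foldl (fun acc x => PySem.List.insertBy ltb x acc) acc).Pairwise
      (fun a b => ltb b a = false) := by
  induction l with
  | nil => intro acc h; simpa using h
  | cons x xs ih => intro acc h; exact ih _ (insertBy_pairwise x acc h)

theorem sorted2_eq_foldl (l : List (Int × Int)) :
    PySem.List.sorted2 l (fun x => x.1) (fun x => x.2) false
      = l.foldl (fun acc x => PySem.List.insertBy ltb x acc) [] := rfl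

theorem sorted2_pairwise_evLt (l : List (Int × Int))
    (hnd : ((PySem.List.sorted2 l (fun x => x.1) (fun x => x.2) false).map Prod.snd).Nodup) :
    (PySem.List.sorted2 l (fun x => x.1) (fun x => x.2) false).Pairwise evLt := by
  have h1 : (PySem.List.sorted2 l (fun x => x.1) (fun x => x.2) false).Pairwise
      (fun a b => ltb b a = false) := by
    rw [sorted2_eq_foldl]; exact foldl_insertBy_pairwise l [] (by simp)
  have h2 : (PySem.List.sorted2 l (fun x => x.1) (fun x => x.2) false).Pairwise
      (fun a b => a.2 ≠ b.2) := (List.pairwise_map.1 hnd)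
  refine (h1.and h2).imp ?_
  rintro a b ⟨hab, hne⟩
  simp only [ltb, Bool.or_eq_false_iff, Bool.and_eq_false_iff, Bool.not_eq_false',
    decide_eq_false_iff_not, decide_eq_true_eq] at hab
  rcases hab with ⟨h3, h4 | h4⟩
  · exact Or.inl h4
  · exact if h : a.1 < b.1 then Or.inl h else Or.inr ⟨by omega, by omega⟩

-- dict index lemmas
theorem dic_untouched (l : List (Int × Int)) : ∀ (id : Int), id ∉ l.map Prod.snd →
    ∀ (d0 : PySem.Dict Int Int) (n0 : Int),
    PySem.Dict.getD
      ((l.foldl (fun (p : PySem.Dict Int Int × Int) lst => (p.1.insert lst.2 p.2, p.2 + 1))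
        (d0, n0)).1) id 0 = PySem.Dict.getD d0 id 0 := by
  induction l with
  | nil => intro id _ d0 n0; rfl
  | cons x xs ih =>
    intro id hid d0 n0
    simp only [List.map_cons, List.mem_cons, not_or] at hid
    simp only [List.foldl_cons]
    rw [ih id hid.2 _ _, PySem.Dict.getD_insert_of_ne _ _ _ hid.1]

theorem dic_spec (l : List (Int × Int)) (hnd : (l.map Prod.snd).Nodup) :
    ∀ (d0 : PySem.Dict Int Int) (n0 : Int) (j : Nat) (hj : j < l.length),
    PySem.Dict.getD
      ((l.foldl (fun (p : PySem.Dict Int Int × Int) lst => (p.1.insert lst.2 p.2, p.2 + 1))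
        (d0, n0)).1) (l[j].2) 0 = n0 + j := by
  induction l with
  | nil => intro _ _ j hj; simp at hj
  | cons x xs ih =>
    intro d0 n0 j hj
    simp only [List.map_cons, List.nodup_cons] at hnd
    cases j with
    | zero =>
      simp only [List.foldl_cons, List.getElem_cons_zero]
      rw [dic_untouched xs x.2 hnd.1 _ _, PySem.Dict.getD_insert_self]
      simp
    | succ j =>
      simp only [List.foldl_cons, List.getElem_cons_succ]
      rw [ih hnd.2 _ _ j (by simpa using hj)]
      push_cast; ring

theorem evMask_fst (Z : List Int) (x : Int × Int) : (evMask Z x).1 = x.1 := by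
  unfold evMask; split <;> rfl

theorem getD_mask (E : List (Int × Int)) (Z : List Int) (j : Nat) (hj : j < E.length) :
    PySem.List.pyGetD (E.map (evMask Z)) ((j : Nat) : Int) ((0 : Int), (0 : Int))
      = evMask Z E[j] := by
  rw [PySem.List.pyGetD_natCast, List.getD_eq_getElem?_getD, List.getElem?_map]
  simp [List.getElem?_eq_getElem hj]

theorem snd_ne_of_nodup (E : List (Int × Int)) (hnd : (E.map Prod.snd).Nodup)
    {i j : Nat} (hi : i < E.length) (hj : j < E.length) (hij : i ≠ j) :
    E[i].2 ≠ E[j].2 := by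
  have hp : E.Pairwise (fun a b => a.2 ≠ b.2) := List.pairwise_map.1 hnd
  rw [List.pairwise_iff_getElem] at hp
  rcases Nat.lt_or_ge i j with h | h
  · exact hp i j hi hj h
  · exact fun hc => (hp j i hj hi (by omega)) hc.symm

theorem popZero_step (E : List (Int × Int)) (dic : PySem.Dict Int Int)
    (hdic : ∀ (j : Nat) (hj : j < E.length), PySem.Dict.getD dic (E[j].2) 0 = (j : Int))
    (hnd : (E.map Prod.snd).Nodup) (Z : List Int) (p : Int)
    (hp : -p ∈ E.map Prod.snd) :
    (PySem.List.pySetD (E.map (evMask Z)) (PySem.Dict.getD dic (-p) 0)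
        ((PySem.List.pyGetD (E.map (evMask Z)) (PySem.Dict.getD dic (-p) 0)
          ((0 : Int), (0 : Int))).1, (0 : Int)))
      = E.map (evMask (Z ++ [-p])) := by
  rcases List.mem_map.1 hp with ⟨x, hxE, hxp⟩
  rcases List.getElem_of_mem hxE with ⟨j, hj, hjx⟩
  have hidx : PySem.Dict.getD dic (-p) 0 = (j : Int) := by
    rw [← hxp, ← hjx]; exact hdic j hj
  rw [hidx, getD_mask E Z j hj, PySem.List.pySetD_natCast]
  apply List.ext_getElem
  · simp
  · intro i hi1 hi2
    have hiE : i < E.length := by simpa using hi2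
    by_cases hij : j = i
    · subst hij
      rw [List.getElem_set_self, List.getElem_map, evMask_fst]
      have hcj : ((Z ++ [-p]).contains E[j].2) = true := by
        rw [hjx, hxp]; simp
      simp only [evMask]
      rw [if_pos hcj]
    · rw [List.getElem_set_ne hij, List.getElem_map, List.getElem_map]
      have hne : E[i].2 ≠ -p := by
        rw [← hxp, ← hjx]
        exact snd_ne_of_nodup E hnd hiE hj (fun hc => hij hc.symm)
      simp [evMask, hne]

theorem popZero_spec (E : List (Int × Int)) (dic : PySem.Dict Int Int)
    (hdic : ∀ (j : Nat) (hj : j < E.length), PySem.Dict.getD dic (E[j].2) 0 = (j : Int))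
    (hnd : (E.map Prod.snd).Nodup) :
    ∀ (st Z : List Int), (∀ p ∈ st, -p ∈ E.map Prod.snd) →
    st.foldl
      (fun dl p =>
        let idx := PySem.Dict.getD dic (-p) 0
        PySem.List.pySetD dl idx ((PySem.List.pyGetD dl idx ((0 : Int), (0 : Int))).1, (0 : Int)))
      (E.map (evMask Z))
    = E.map (evMask (Z ++ st.map (fun p => -p))) := by
  intro st
  induction st with
  | nil => intro Z _; simp
  | cons p st' ih =>
    intro Z hmem
    simp only [List.foldl_cons]
    rw [popZero_step E dic hdic hnd Z p (hmem p (List.mem_cons_self))]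
    rw [ih (Z ++ [-p]) (fun q hq => hmem q (List.mem_cons_of_mem _ hq))]
    simp

theorem loop_eq_sweep2 (E : List (Int × Int)) (dic : PySem.Dict Int Int)
    (hdic : ∀ (j : Nat) (hj : j < E.length), PySem.Dict.getD dic (E[j].2) 0 = (j : Int))
    (hnd : (E.map Prod.snd).Nodup)
    (hpairs : ∀ x ∈ E, 0 < x.2 → -x.2 ∈ E.map Prod.snd) :
    ∀ (m k : Nat), k + m = E.length → ∀ (Z stack : List Int) (ans : Int),
    (∀ p ∈ stack, -p ∈ E.map Prod.snd) →
    ((PySem.List.pyRange ((k : Nat) : Int) ((E.length : Nat) : Int) 1).foldl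
      (fun (st : List (Int × Int) × List Int × Int) idx =>
        let lst := PySem.List.pyGetD st.1 idx ((0 : Int), (0 : Int))
        if lst.2 > 0 then (st.1, st.2.1 ++ [lst.2], st.2.2)
        else if lst.2 < 0 then (popZero dic st.1 st.2.1, ([] : List Int), st.2.2 + 1)
        else st)
      (E.map (evMask Z), stack, ans)).2.2
    = sweep2 (E.drop k) Z stack ans := by
  intro m
  induction m with
  | zero =>
    intro k hk Z stack ans _
    rw [PySem.List.pyRange_one_eq_nil (by omega), List.foldl_nil]
    rw [show k = E.length by omega, List.drop_length]
    rfl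
  | succ m ih =>
    intro k hk Z stack ans hstk
    have hkE : k < E.length := by omega
    rw [PySem.List.pyRange_one_cons (by exact_mod_cast hkE), List.foldl_cons]
    rw [List.drop_eq_getElem_cons hkE]
    have hsucc : ((k : Int) + 1) = (((k + 1 : Nat) : Nat) : Int) := by push_cast; ring
    simp only [getD_mask E Z k hkE]
    by_cases hc : E[k].2 ∈ Z
    · have hmask : evMask Z E[k] = (E[k].1, 0) := by simp [evMask, hc]
      have hcb : Z.contains E[k].2 = true := by simpa using hc
      rw [hmask]
      rw [if_neg (by norm_num : ¬ ((0:Int) > 0)), if_neg (by norm_num : ¬ ((0:Int) < 0))]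
      rw [hsucc, ih (k+1) (by omega) Z stack ans hstk]
      have hswp : sweep2 (E[k] :: E.drop (k+1)) Z stack ans
          = sweep2 (E.drop (k+1)) Z stack ans := by
        simp only [sweep2, hcb]
        norm_num
      rw [hswp]
    · have hmask : evMask Z E[k] = E[k] := by simp [evMask, hc]
      have hcb : Z.contains E[k].2 = false := by simpa using hc
      rw [hmask]
      have hswp : sweep2 (E[k] :: E.drop (k+1)) Z stack ans
          = (if 0 < E[k].2 then sweep2 (E.drop (k+1)) Z (stack ++ [E[k].2]) ans
             else if E[k].2 < 0 then
               sweep2 (E.drop (k+1)) (Z ++ stack.reverse.map (fun p => -p)) [] (ans + 1)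
             else sweep2 (E.drop (k+1)) Z stack ans) := by
        simp only [sweep2, hcb, Bool.false_eq_true, if_false]
      rw [hswp]
      by_cases h1 : (0:Int) < E[k].2
      · rw [if_pos (by omega : E[k].2 > 0), if_pos h1, hsucc]
        exact ih (k+1) (by omega) Z (stack ++ [E[k].2]) ans
          (by intro p hp
              rcases List.mem_append.1 hp with hp | hp
              · exact hstk p hp
              · rcases List.mem_singleton.1 hp with rfl
                exact hpairs E[k] (E.getElem_mem hkE) h1)
      · rw [if_neg (by omega : ¬ E[k].2 > 0), if_neg h1]
        by_cases h2 : E[k].2 < 0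
        · rw [if_pos h2, if_pos h2]
          rw [show popZero dic (E.map (evMask Z)) stack
              = E.map (evMask (Z ++ stack.reverse.map (fun p => -p))) by
            unfold popZero
            exact popZero_spec E dic hdic hnd stack.reverse Z
              (fun p hp => hstk p (List.mem_reverse.1 hp))]
          rw [hsucc]
          exact ih (k+1) (by omega) _ [] (ans+1) (by simp)
        · rw [if_neg h2, if_neg h2, hsucc]
          exact ih (k+1) (by omega) Z stack ans hstk

theorem fst_unique (A : List (Int × Int)) (hnd : (A.map Prod.snd).Nodup)
    {v1 v2 i : Int} (h1 : (v1, i) ∈ A) (h2 : (v2, i) ∈ A) : v1 = v2 := by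
  rcases List.getElem_of_mem h1 with ⟨a, ha, hae⟩
  rcases List.getElem_of_mem h2 with ⟨b, hb, hbe⟩
  by_cases hab : a = b
  · subst hab; rw [hae] at hbe; exact (Prod.mk.injEq _ _ _ _ ▸ hbe).1
  · have := snd_ne_of_nodup A hnd ha hb hab
    rw [hae, hbe] at this; simp at this

theorem pairwise_decomp {pre rest : List (Int × Int)} {x : Int × Int}
    (h : (pre ++ x :: rest).Pairwise evLt) :
    (∀ y ∈ pre, evLt y x) ∧ (∀ y ∈ rest, evLt x y) := by
  rw [List.pairwise_append] at h
  rcases h with ⟨_, h2, h3⟩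
  rcases List.pairwise_cons.1 h2 with ⟨h4, _⟩
  exact ⟨fun y hy => h3 y hy x List.mem_cons_self, h4⟩

theorem endsP_cons_nonneg {ts : List (List Int)} {x : Int × Int} {l : List (Int × Int)}
    (h : ¬ x.2 < 0) : endsP ts (x :: l) = endsP ts l := by
  simp [endsP, List.filter_cons, h]

theorem endsP_cons_neg {ts : List (List Int)} {x : Int × Int} {l : List (Int × Int)}
    (h : x.2 < 0) : endsP ts (x :: l) = (sK ts ((-x.2).toNat - 1), x.1) :: endsP ts l := by
  simp [endsP, List.filter_cons, h]

theorem greedy_cons (c : Option Int) (ans : Int) (p : Int × Int) (l : List (Int × Int)) :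
    greedy c ans (p :: l) = greedy (gstep (c, ans) p).1 (gstep (c, ans) p).2 l := by
  simp [greedy]

theorem sweep2_eq_greedy (ts : List (List Int)) :
    ∀ (rest pre : List (Int × Int)) (Z stack : List Int) (c : Option Int) (ans : Int),
    ((pre ++ rest).Perm (evs ts 0)) →
    ((pre ++ rest).Pairwise evLt) →
    (∀ p, p ∈ stack ↔ 0 < p ∧ ∃ v, (v, p) ∈ pre ∧ ∀ cv, c = some cv → cv ≤ v) →
    (∀ z, z ∈ Z ↔ z < 0 ∧ ∃ cv v, c = some cv ∧ (v, -z) ∈ pre ∧ v < cv) →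
    (∀ cv, c = some cv → ∃ idc, idc < 0 ∧ (cv, idc) ∈ pre) →
    sweep2 rest Z stack ans = greedy c ans (endsP ts rest) := by
  intro rest
  induction rest with
  | nil => intro pre Z stack c ans _ _ _ _ _; simp [sweep2, greedy, endsP]
  | cons x rest ih =>
    intro pre Z stack c ans hperm hsort hstack hZ hc
    have hnd : ((pre ++ x :: rest).map Prod.snd).Nodup :=
      ((hperm.map Prod.snd).nodup_iff).2 (evs_snd_nodup ts 0 le_rfl)
    have hxA : x ∈ pre ++ x :: rest := by simp
    have hxev : x ∈ evs ts 0 := hperm.subset hxA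
    rcases (mem_evs_iff x ts 0).1 hxev with ⟨k, hk, hx | hx⟩
    · -- START event: x = (sK ts k, k+1)
      have hx2pos : 0 < x.2 := by rw [hx]; dsimp only; omega
      have hxZ : x.2 ∉ Z := fun hmem => by have := (hZ x.2).1 hmem; omega
      have hcb : Z.contains x.2 = false := by simpa using hxZ
      have hstep : sweep2 (x :: rest) Z stack ans
          = sweep2 rest Z (stack ++ [x.2]) ans := by
        simp only [sweep2, hcb, Bool.false_eq_true, if_false]
        rw [if_pos hx2pos]
      rw [hstep, endsP_cons_nonneg (by omega)]
      have hassoc : (pre ++ [x]) ++ rest = pre ++ x :: rest := by simp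
      have hcvle : ∀ cv, c = some cv → cv ≤ x.1 := by
        intro cv hcv
        rcases hc cv hcv with ⟨idc, hidc, hmem⟩
        have := (pairwise_decomp hsort).1 _ hmem
        rcases this with h | ⟨h1, h2⟩ <;> omega
      apply ih (pre ++ [x]) Z (stack ++ [x.2]) c ans (hassoc ▸ hperm) (hassoc ▸ hsort)
      · intro p
        constructor
        · intro hp
          rcases List.mem_append.1 hp with hp | hp
          · rcases (hstack p).1 hp with ⟨hpp, v, hv, hcv⟩
            exact ⟨hpp, v, List.mem_append_left _ hv, hcv⟩
          · rcases List.mem_singleton.1 hp with rfl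
            exact ⟨hx2pos, x.1, by simp, hcvle⟩
        · rintro ⟨hpp, v, hv, hcv⟩
          rcases List.mem_append.1 hv with hv | hv
          · exact List.mem_append_left _ ((hstack p).2 ⟨hpp, v, hv, hcv⟩)
          · rcases List.mem_singleton.1 hv with hv
            have : p = x.2 := by
              have := congrArg Prod.snd hv; simpa using this
            simp [this]
      · intro z
        rw [hZ z]
        constructor
        · rintro ⟨hz, cv, v, hcv, hmem, hvc⟩
          exact ⟨hz, cv, v, hcv, List.mem_append_left _ hmem, hvc⟩
        · rintro ⟨hz, cv, v, hcv, hmem, hvc⟩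
          rcases List.mem_append.1 hmem with hmem | hmem
          · exact ⟨hz, cv, v, hcv, hmem, hvc⟩
          · rcases List.mem_singleton.1 hmem with hmem
            have hv1 : v = x.1 := (Prod.mk.injEq _ _ _ _ ▸ hmem).1
            have := hcvle cv hcv
            omega
      · intro cv hcv
        rcases hc cv hcv with ⟨idc, h1, h2⟩
        exact ⟨idc, h1, List.mem_append_left _ h2⟩
    · -- END event: x = (eK ts k, -(k+1))
      have hx2neg : x.2 < 0 := by rw [hx]; dsimp only; omega
      have hx1 : x.1 = eK ts k := by rw [hx]
      have hx2 : x.2 = -((k : Int) + 1) := by rw [hx]; dsimp only; omega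
      have hkx : ((-x.2).toNat - 1) = k := by rw [hx2]; omega
      have hstart : (sK ts k, (k : Int) + 1) ∈ pre ++ x :: rest :=
        (hperm.mem_iff).2 ((mem_evs_iff _ ts 0).2 ⟨k, hk, Or.inl (by norm_num)⟩)
      have hstart_ne_x : (sK ts k, (k : Int) + 1) ≠ x := by
        intro hcon
        have := congrArg Prod.snd hcon
        rw [hx2] at this; simp at this; omega
      -- start is in pre iff sK < eK's coordinate (= x.1)
      have hstart_pre_of_rest : (sK ts k, (k : Int) + 1) ∈ rest → x.1 ≤ sK ts k := by
        intro hmem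
        have := (pairwise_decomp hsort).2 _ hmem
        rcases this with h | ⟨h1, h2⟩
        · omega
        · omega
      have hstart_pre : sK ts k < x.1 → (sK ts k, (k : Int) + 1) ∈ pre := by
        intro hlt
        rcases List.mem_append.1 hstart with h | h
        · exact h
        · rcases List.mem_cons.1 h with h | h
          · exact absurd h hstart_ne_x
          · have := hstart_pre_of_rest h; omega
      have hZx : x.2 ∈ Z ↔ ∃ cv, c = some cv ∧ sK ts k < cv := by
        rw [hZ x.2]
        constructor
        · rintro ⟨hz, cv, v, hcv, hmem, hvc⟩
          have hvs : v = sK ts k := by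
            have hmem' : (v, (k : Int) + 1) ∈ pre := by
              rw [show -x.2 = (k:Int)+1 by omega] at hmem
              exact hmem
            exact fst_unique _ hnd (List.mem_append_left _ hmem') hstart
          exact ⟨cv, hcv, by omega⟩
        · rintro ⟨cv, hcv, hlt⟩
          rcases hc cv hcv with ⟨idc, hidc, hcmem⟩
          have hcvle : cv ≤ x.1 := by
            have := (pairwise_decomp hsort).1 _ hcmem
            rcases this with h | ⟨h1, h2⟩ <;> omega
          refine ⟨by omega, cv, sK ts k, hcv, ?_, hlt⟩
          rw [show -x.2 = (k:Int)+1 by omega]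
          exact hstart_pre (by omega)
      rw [endsP_cons_neg hx2neg, hkx]
      cases c with
      | none =>
        have hxZ : x.2 ∉ Z := by rw [hZx]; rintro ⟨cv, hcv, _⟩; simp at hcv
        have hcb : Z.contains x.2 = false := by simpa using hxZ
        have hstep : sweep2 (x :: rest) Z stack ans
            = sweep2 rest (Z ++ stack.reverse.map (fun p => -p)) [] (ans + 1) := by
          simp only [sweep2, hcb, Bool.false_eq_true, if_false]
          rw [if_neg (by omega), if_pos hx2neg]
        rw [hstep, greedy_cons]
        have hgs : gstep (none, ans) (sK ts k, x.1) = (some x.1, ans + 1) := rfl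
        rw [hgs]
        have hassoc : (pre ++ [x]) ++ rest = pre ++ x :: rest := by simp
        apply ih (pre ++ [x]) _ [] (some x.1) (ans + 1) (hassoc ▸ hperm) (hassoc ▸ hsort)
        · intro p
          simp only [List.not_mem_nil, false_iff]
          rintro ⟨hpp, v, hv, hcv⟩
          have hvle := hcv x.1 rfl
          rcases List.mem_append.1 hv with hv | hv
          · have := (pairwise_decomp hsort).1 _ hv
            rcases this with h | ⟨h1, h2⟩ <;> omega
          · rcases List.mem_singleton.1 hv with hv
            have : p = x.2 := by have := congrArg Prod.snd hv; simpa using this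
            omega
        · intro z
          constructor
          · intro hmem
            rcases List.mem_append.1 hmem with hmem | hmem
            · have := (hZ z).1 hmem
              rcases this with ⟨_, cv, v, hcv, _⟩; simp at hcv
            · rcases List.mem_map.1 hmem with ⟨p, hp, rfl⟩
              have hp' := (hstack p).1 (List.mem_reverse.1 hp)
              rcases hp' with ⟨hpp, v, hv, _⟩
              have hvlt : v < x.1 := by
                have := (pairwise_decomp hsort).1 _ hv
                rcases this with h | ⟨h1, h2⟩ <;> omega
              exact ⟨by omega, x.1, v, rfl, by rw [neg_neg]; exact List.mem_append_left _ hv, hvlt⟩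
          · rintro ⟨hz, cv, v, hcv, hmem, hvc⟩
            rcases Option.some.injEq _ _ ▸ hcv with rfl
            rcases List.mem_append.1 hmem with hmem | hmem
            · apply List.mem_append_right
              rw [List.mem_map]
              refine ⟨-z, List.mem_reverse.2 ((hstack (-z)).2 ⟨by omega, v, hmem, ?_⟩), by omega⟩
              rintro cv2 hcv2; simp at hcv2
            · rcases List.mem_singleton.1 hmem with hmem
              have := congrArg Prod.snd hmem
              simp at this; omega
        · rintro cv hcv
          rcases Option.some.injEq _ _ ▸ hcv with rfl
          exact ⟨x.2, hx2neg, List.mem_append_right _ (by simp)⟩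
      | some cv =>
        have hcvle : cv ≤ x.1 := by
          rcases hc cv rfl with ⟨idc, hidc, hcmem⟩
          have := (pairwise_decomp hsort).1 _ hcmem
          rcases this with h | ⟨h1, h2⟩ <;> omega
        by_cases hzr : sK ts k < cv
        · -- zeroed: skip
          have hxZ : x.2 ∈ Z := hZx.2 ⟨cv, rfl, hzr⟩
          have hcb : Z.contains x.2 = true := by simpa using hxZ
          have hstep : sweep2 (x :: rest) Z stack ans = sweep2 rest Z stack ans := by
            simp only [sweep2, hcb, if_true]
            norm_num
          rw [hstep, greedy_cons]
          have hgs : gstep (some cv, ans) (sK ts k, x.1) = (some cv, ans) := by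
            simp [gstep]; omega
          rw [hgs]
          have hassoc : (pre ++ [x]) ++ rest = pre ++ x :: rest := by simp
          apply ih (pre ++ [x]) Z stack (some cv) ans (hassoc ▸ hperm) (hassoc ▸ hsort)
          · intro p
            rw [hstack p]
            constructor
            · rintro ⟨hpp, v, hv, hcv2⟩
              exact ⟨hpp, v, List.mem_append_left _ hv, hcv2⟩
            · rintro ⟨hpp, v, hv, hcv2⟩
              rcases List.mem_append.1 hv with hv | hv
              · exact ⟨hpp, v, hv, hcv2⟩
              · rcases List.mem_singleton.1 hv with hv
                have : p = x.2 := by have := congrArg Prod.snd hv; simpa using this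
                omega
          · intro z
            rw [hZ z]
            constructor
            · rintro ⟨hz, cv2, v, hcv2, hmem, hvc⟩
              exact ⟨hz, cv2, v, hcv2, List.mem_append_left _ hmem, hvc⟩
            · rintro ⟨hz, cv2, v, hcv2, hmem, hvc⟩
              rcases List.mem_append.1 hmem with hmem | hmem
              · exact ⟨hz, cv2, v, hcv2, hmem, hvc⟩
              · rcases List.mem_singleton.1 hmem with hmem
                have := congrArg Prod.snd hmem
                simp at this; omega
          · rintro cv2 hcv2
            rcases hc cv2 hcv2 with ⟨idc, h1, h2⟩
            exact ⟨idc, h1, List.mem_append_left _ h2⟩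
        · -- not zeroed: shot
          have hxZ : x.2 ∉ Z := by
            rw [hZx]; rintro ⟨cv2, hcv2, hlt⟩
            rcases Option.some.injEq _ _ ▸ hcv2 with rfl; omega
          have hcb : Z.contains x.2 = false := by simpa using hxZ
          have hstep : sweep2 (x :: rest) Z stack ans
              = sweep2 rest (Z ++ stack.reverse.map (fun p => -p)) [] (ans + 1) := by
            simp only [sweep2, hcb, Bool.false_eq_true, if_false]
            rw [if_neg (by omega), if_pos hx2neg]
          rw [hstep, greedy_cons]
          have hgs : gstep (some cv, ans) (sK ts k, x.1) = (some x.1, ans + 1) := by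
            simp [gstep]; omega
          rw [hgs]
          have hassoc : (pre ++ [x]) ++ rest = pre ++ x :: rest := by simp
          apply ih (pre ++ [x]) _ [] (some x.1) (ans + 1) (hassoc ▸ hperm) (hassoc ▸ hsort)
          · intro p
            simp only [List.not_mem_nil, false_iff]
            rintro ⟨hpp, v, hv, hcv2⟩
            have hvle := hcv2 x.1 rfl
            rcases List.mem_append.1 hv with hv | hv
            · have := (pairwise_decomp hsort).1 _ hv
              rcases this with h | ⟨h1, h2⟩ <;> omega
            · rcases List.mem_singleton.1 hv with hv
              have : p = x.2 := by have := congrArg Prod.snd hv; simpa using this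
              omega
          · intro z
            constructor
            · intro hmem
              rcases List.mem_append.1 hmem with hmem | hmem
              · rcases (hZ z).1 hmem with ⟨hz, cv2, v, hcv2, hvmem, hvc⟩
                rcases Option.some.injEq _ _ ▸ hcv2 with rfl
                have hvlt : v < x.1 := by omega
                exact ⟨hz, x.1, v, rfl, List.mem_append_left _ hvmem, hvlt⟩
              · rcases List.mem_map.1 hmem with ⟨p, hp, rfl⟩
                rcases (hstack p).1 (List.mem_reverse.1 hp) with ⟨hpp, v, hv, _⟩
                have hvlt : v < x.1 := by
                  have := (pairwise_decomp hsort).1 _ hv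
                  rcases this with h | ⟨h1, h2⟩ <;> omega
                exact ⟨by omega, x.1, v, rfl, by rw [neg_neg]; exact List.mem_append_left _ hv, hvlt⟩
            · rintro ⟨hz, cv2, v, hcv2, hmem, hvc⟩
              rcases Option.some.injEq _ _ ▸ hcv2 with rfl
              rcases List.mem_append.1 hmem with hmem | hmem
              · by_cases hvcv : v < cv
                · exact List.mem_append_left _ ((hZ z).2 ⟨hz, cv, v, rfl, hmem, hvcv⟩)
                · apply List.mem_append_right
                  rw [List.mem_map]
                  exact ⟨-z, List.mem_reverse.2 ((hstack (-z)).2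
                    ⟨by omega, v, hmem, fun cv2 hcv2 => by
                      rcases Option.some.injEq _ _ ▸ hcv2 with rfl; omega⟩), by omega⟩
              · rcases List.mem_singleton.1 hmem with hmem
                have := congrArg Prod.snd hmem
                simp at this; omega
          · rintro cv2 hcv2
            rcases Option.some.injEq _ _ ▸ hcv2 with rfl
            exact ⟨x.2, hx2neg, List.mem_append_right _ (by simp)⟩

theorem filt_evs : ∀ (ts : List (List Int)) (b : Int), 0 ≤ b →
    (evs ts b).filter (fun x => decide (x.2 < 0))
      = (List.range ts.length).map (fun k => (eK ts k, -(b + (k : Int) + 1))) := by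
  intro ts
  induction ts with
  | nil => intro b _; simp [evs]
  | cons t r ih =>
    intro b hb
    simp only [evs, List.filter_cons]
    rw [if_neg (by simp; omega), if_pos (by simp; omega), ih (b + 1) (by omega),
      List.length_cons, List.range_succ_eq_map, List.map_cons, List.map_map]
    refine congrArg₂ _ ?_ ?_
    · rw [show eK (t :: r) 0 = PySem.List.pyGetD t 1 0 from rfl]
      norm_num
    · apply List.map_congr_left
      intro k _
      have h1 : eK r k = eK (t :: r) (k + 1) := rfl
      simp only [Function.comp_apply, h1, Prod.mk.injEq, true_and]
      push_cast; ring

theorem map_toPair (ts : List (List Int)) :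
    ts.map (fun t => (PySem.List.pyGetD t 0 0, PySem.List.pyGetD t 1 0))
      = (List.range ts.length).map (fun k => (sK ts k, eK ts k)) := by
  apply List.ext_getElem
  · simp
  · intro i hi1 hi2
    simp only [List.getElem_map, List.getElem_range]
    have hgd : ts[i]?.getD [] = ts[i]'(by simpa using hi1) := by
      rw [List.getElem?_eq_getElem (by simpa using hi1)]
      rfl
    simp [sK, eK, hgd]

theorem evs_pairPos (ts : List (List Int)) (x : Int × Int) (hx : x ∈ evs ts 0)
    (hpos : 0 < x.2) : -x.2 ∈ (evs ts 0).map Prod.snd := by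
  rcases (mem_evs_iff x ts 0).1 hx with ⟨k, hk, h | h⟩
  · refine List.mem_map.2 ⟨(eK ts k, -((0 : Int) + (k : Int) + 1)),
      (mem_evs_iff _ ts 0).2 ⟨k, hk, Or.inr rfl⟩, ?_⟩
    rw [h]
  · rw [h] at hpos; dsimp only at hpos; omega

theorem solutionA_loop (D : List (Int × Int)) (dic : PySem.Dict Int Int)
    (hdic : ∀ (j : Nat) (hj : j < D.length), PySem.Dict.getD dic (D[j].2) 0 = (j : Int))
    (hnd : (D.map Prod.snd).Nodup)
    (hpairs : ∀ x ∈ D, 0 < x.2 → -x.2 ∈ D.map Prod.snd) :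
    ((PySem.List.pyRange 0 (PySem.List.len D) 1).foldl
      (fun (st : List (Int × Int) × List Int × Int) idx =>
        let lst := PySem.List.pyGetD st.1 idx ((0 : Int), (0 : Int))
        if lst.2 > 0 then (st.1, st.2.1 ++ [lst.2], st.2.2)
        else if lst.2 < 0 then (popZero dic st.1 st.2.1, ([] : List Int), st.2.2 + 1)
        else st)
      (D, ([] : List Int), (0 : Int))).2.2 = sweep2 D [] [] 0 := by
  have h0 : D.map (evMask []) = D := by
    have hfn : evMask [] = fun x => x := by
      funext x; simp [evMask]
    rw [hfn, List.map_id']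
  have := loop_eq_sweep2 D dic hdic hnd hpairs D.length 0 (by omega) [] [] 0 (by simp)
  rw [h0] at this
  rw [List.drop_zero] at this
  rw [PySem.List.len_eq]
  rw [show ((0 : Nat) : Int) = 0 from rfl] at this
  exact this

theorem solution_alt_eq_greedy (ts : List (List Int)) :
    solution_alt ts = greedy none 0
      ((PySem.List.sorted ts.reverse (fun t => PySem.List.pyGetD t 1 0) false).map
        (fun t => (PySem.List.pyGetD t 0 0, PySem.List.pyGetD t 1 0))) := by
  unfold solution_alt greedy
  rw [List.foldl_map]
  rfl

-- two permuted lists, both sorted under an asymmetric relation, are equal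
theorem perm_pairwise_eq (r : Int × Int → Int × Int → Prop)
    (hasym : ∀ a b, r a b → r b a → False) :
    ∀ (l1 l2 : List (Int × Int)), l1.Perm l2 → l1.Pairwise r → l2.Pairwise r → l1 = l2 := by
  intro l1
  induction l1 with
  | nil => intro l2 hp _ _; exact (hp.symm.eq_nil).symm
  | cons x t1 ih =>
    intro l2 hp hpw1 hpw2
    cases l2 with
    | nil => exact absurd hp.eq_nil (by simp)
    | cons y t2 =>
      rcases List.pairwise_cons.1 hpw1 with ⟨hx1, hpt1⟩
      rcases List.pairwise_cons.1 hpw2 with ⟨hy2, hpt2⟩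
      have hxy : x = y := by
        rcases List.mem_cons.1 (hp.subset List.mem_cons_self) with h | h
        · exact h
        · rcases List.mem_cons.1 (hp.symm.subset List.mem_cons_self) with h2 | h2
          · exact h2.symm
          · exact absurd (hy2 x h) (fun hr => hasym _ _ (hx1 y h2) hr)
      subst hxy
      rw [ih t2 hp.cons_inv hpt1 hpt2]

-- stability of the insertion sort by fst: a snd-increasing input sorts to an evLt chain
theorem insertBy_stable (x : Int × Int) (acc : List (Int × Int))
    (hacc : acc.Pairwise evLt) (hx : ∀ y ∈ acc, y.2 < x.2) :
    (PySem.List.insertBy (fun a b => decide (a.1 < b.1)) x acc).Pairwise evLt := by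
  induction acc with
  | nil => simp [PySem.List.insertBy]
  | cons y ys ih =>
    rcases List.pairwise_cons.1 hacc with ⟨hy, hys⟩
    by_cases hxy : x.1 < y.1
    · rw [show PySem.List.insertBy (fun a b => decide (a.1 < b.1)) x (y :: ys) = x :: y :: ys by
        simp [PySem.List.insertBy, hxy]]
      refine List.pairwise_cons.2 ⟨?_, hacc⟩
      intro z hz
      rcases List.mem_cons.1 hz with rfl | hz
      · exact Or.inl hxy
      · have := hy z hz
        rcases this with h | ⟨h1, _⟩ <;> exact Or.inl (by omega)
    · rw [show PySem.List.insertBy (fun a b => decide (a.1 < b.1)) x (y :: ys)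
          = y :: PySem.List.insertBy (fun a b => decide (a.1 < b.1)) x ys by
        simp [PySem.List.insertBy, hxy]]
      refine List.pairwise_cons.2 ⟨?_, ih hys (fun z hz => hx z (List.mem_cons_of_mem _ hz))⟩
      intro z hz
      rcases (PySem.List.mem_insertBy _ x z ys).1 hz with rfl | hz
      · by_cases h : y.1 < z.1
        · exact Or.inl h
        · exact Or.inr ⟨by omega, hx y List.mem_cons_self⟩
      · exact hy z hz

theorem stable_fold (l : List (Int × Int)) : ∀ (acc : List (Int × Int)),
    acc.Pairwise evLt → (∀ y ∈ acc, ∀ x ∈ l, y.2 < x.2) →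
    l.Pairwise (fun a b => a.2 < b.2) →
    (l.foldl (fun acc x => PySem.List.insertBy (fun a b => decide (a.1 < b.1)) x acc)
      acc).Pairwise evLt := by
  induction l with
  | nil => intro acc h _ _; simpa using h
  | cons x l' ih =>
    intro acc hacc hcross hl
    rcases List.pairwise_cons.1 hl with ⟨hxl, hl'⟩
    simp only [List.foldl_cons]
    apply ih
    · exact insertBy_stable x acc hacc (fun y hy => hcross y hy x List.mem_cons_self)
    · intro y hy z hz
      rcases (PySem.List.mem_insertBy _ x y acc).1 hy with rfl | hy
      · exact hxl z hz
      · exact hcross y hy z (List.mem_cons_of_mem _ hz)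
    · exact hl'

theorem sorted_fst_stable (l : List (Int × Int))
    (hl : l.Pairwise (fun a b => a.2 < b.2)) :
    (PySem.List.sorted l (fun x => x.1) false).Pairwise evLt := by
  rw [PySem.List.sorted_eq_foldl_insertBy]
  exact stable_fold l [] (by simp) (by simp) hl

-- map commutes with the insertion sort when the key factors through the map
theorem map_insertBy {α β : Type} (f : α → β) (k1 : α → Int) (k2 : β → Int)
    (hk : ∀ a, k2 (f a) = k1 a) (x : α) :
    ∀ (l : List α),
    (PySem.List.insertBy (fun a b => decide (k1 a < k1 b)) x l).map f
      = PySem.List.insertBy (fun a b => decide (k2 a < k2 b)) (f x) (l.map f) := by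
  intro l
  induction l with
  | nil => simp [PySem.List.insertBy]
  | cons y ys ih =>
    by_cases h : k1 x < k1 y
    · rw [show PySem.List.insertBy (fun a b => decide (k1 a < k1 b)) x (y :: ys)
          = x :: y :: ys by simp [PySem.List.insertBy, h]]
      rw [List.map_cons, List.map_cons,
        show PySem.List.insertBy (fun a b => decide (k2 a < k2 b)) (f x) (f y :: ys.map f)
          = f x :: f y :: ys.map f by simp [PySem.List.insertBy, hk, h]]
    · rw [show PySem.List.insertBy (fun a b => decide (k1 a < k1 b)) x (y :: ys)
          = y :: PySem.List.insertBy (fun a b => decide (k1 a < k1 b)) x ys by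
        simp [PySem.List.insertBy, h]]
      rw [List.map_cons, List.map_cons,
        show PySem.List.insertBy (fun a b => decide (k2 a < k2 b)) (f x) (f y :: ys.map f)
          = f y :: PySem.List.insertBy (fun a b => decide (k2 a < k2 b)) (f x) (ys.map f) by
        simp [PySem.List.insertBy, hk, h]]
      rw [ih]

theorem map_sorted_comm {α β : Type} (f : α → β) (k1 : α → Int) (k2 : β → Int)
    (hk : ∀ a, k2 (f a) = k1 a) (l : List α) :
    (PySem.List.sorted l k1 false).map f = PySem.List.sorted (l.map f) k2 false := by
  rw [PySem.List.sorted_eq_foldl_insertBy, PySem.List.sorted_eq_foldl_insertBy]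
  suffices h : ∀ (acc : List α),
      (l.foldl (fun acc x => PySem.List.insertBy (fun a b => decide (k1 a < k1 b)) x acc)
        acc).map f
      = (l.map f).foldl
          (fun acc x => PySem.List.insertBy (fun a b => decide (k2 a < k2 b)) x acc)
          (acc.map f) by
    simpa using h []
  induction l with
  | nil => intro acc; simp
  | cons x xs ih =>
    intro acc
    simp only [List.foldl_cons, List.map_cons]
    rw [ih, map_insertBy f k1 k2 hk]

-- ===== VERDICT (by name: the statement is the Claim_ definition above) =====
theorem solution_spec : Claim_equal_solution := by
  unfold Claim_equal_solution
  intro ts _ _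
  unfold Spec_solution
  -- the sorted event list
  have hpermE : (PySem.List.sorted2 (evs ts 0) (fun x => x.1) (fun x => x.2) false).Perm
      (evs ts 0) := PySem.List.sorted2_perm _ _ _ _
  set E := PySem.List.sorted2 (evs ts 0) (fun x => x.1) (fun x => x.2) false with hEdef
  have hndE : (E.map Prod.snd).Nodup :=
    ((hpermE.map Prod.snd).nodup_iff).2 (evs_snd_nodup ts 0 le_rfl)
  have hsortE : E.Pairwise evLt := sorted2_pairwise_evLt _ hndE
  have hpairsE : ∀ x ∈ E, 0 < x.2 → -x.2 ∈ E.map Prod.snd := by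
    intro x hx hpos
    have := evs_pairPos ts x (hpermE.subset hx) hpos
    exact ((hpermE.map Prod.snd).mem_iff).2 this
  -- A = sweep2 = greedy over the ends of E
  have hA : solution ts = sweep2 E [] [] 0 := by
    unfold solution
    rw [show (([] : List (Int × Int)), (1 : Int), (-1 : Int))
        = (([] : List (Int × Int)), (0 : Int) + 1, -((0 : Int) + 1)) by norm_num]
    rw [build_eq ts [] 0]
    simp only [List.nil_append]
    rw [← hEdef]
    exact solutionA_loop E _
      (fun j hj => by
        have := dic_spec E hndE PySem.Dict.empty 0 j hj
        simpa using this)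
      hndE hpairsE
  have hAB : sweep2 E [] [] 0 = greedy none 0 (endsP ts E) := by
    apply sweep2_eq_greedy ts E [] [] [] none 0
    · simpa using hpermE
    · simpa using hsortE
    · intro p; simp
    · intro z; simp
    · intro cv hcv; simp at hcv
  -- the filtered end-event list of E IS the stable sort of the ends in reverse input order
  have hFG : E.filter (fun x => decide (x.2 < 0))
      = PySem.List.sorted
          ((List.range ts.length).reverse.map (fun k => (eK ts k, -((0 : Int) + (k : Int) + 1))))
          (fun x => x.1) false := by
    apply perm_pairwise_eq evLt (by intro a b h1 h2; unfold evLt at h1 h2; omega)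
    · refine ((hpermE.filter _).trans ?_).trans
        (PySem.List.sorted_perm _ _ _).symm
      rw [filt_evs ts 0 le_rfl]
      exact ((List.reverse_perm _).map _).symm
    · exact hsortE.sublist (List.filter_sublist)
    · apply sorted_fst_stable
      rw [List.pairwise_map, List.pairwise_reverse]
      have := List.pairwise_lt_range (n := ts.length)
      refine this.imp ?_
      intro a b hab
      dsimp only
      omega
  -- push the (s, e) projection through both sides
  have hlift : endsP ts E
      = (PySem.List.sorted ts.reverse (fun t => PySem.List.pyGetD t 1 0) false).map
          (fun t => (PySem.List.pyGetD t 0 0, PySem.List.pyGetD t 1 0)) := by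
    unfold endsP
    rw [hFG]
    rw [map_sorted_comm (α := Int × Int) (β := Int × Int)
      (fun x => (sK ts ((-x.2).toNat - 1), x.1)) (fun x => x.1)
      (fun y => y.2) (fun a => rfl)
      ((List.range ts.length).reverse.map (fun k => (eK ts k, -((0 : Int) + (k : Int) + 1))))]
    rw [map_sorted_comm (α := List Int) (β := Int × Int)
      (fun t => (PySem.List.pyGetD t 0 0, PySem.List.pyGetD t 1 0))
      (fun t => PySem.List.pyGetD t 1 0) (fun y => y.2) (fun a => rfl) ts.reverse]
    congr 1
    simp only [List.map_reverse]
    congr 1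
    rw [List.map_map, map_toPair]
    apply List.map_congr_left
    intro k _
    dsimp only [Function.comp_apply]
    have h1 : ((-(-((0 : Int) + (k : Int) + 1))).toNat - 1) = k := by omega
    rw [h1]
  rw [hA, hAB, hlift, solution_alt_eq_greedy ts]
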